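-- pv_equiv track=rewrite | github.com/ZigaOpara/Advent-of-code | 2015/day_16.py | part_two
-- ===== SOURCE A (Python) =====
-- desired_attributes = {
--     'children': 3,
--     'cats': 7,
--     'samoyeds': 2,
--     'pomeranians': 3,
--     'akitas': 0,
--     'vizslas': 0,
--     'goldfish': 5,
--     'trees': 3,
--     'cars': 2,
--     'perfumes': 1,
-- }
--
-- def part_two(puzzle_input):
--     for sue, attributes in puzzle_input.items():
--         comparison = []
--         for attribute, value in attributes.items():
--             if attribute in ['cats', 'trees']:
--                 comparison.append(value > desired_attributes[attribute])
--             elif attribute in ['pomeranians', 'goldfish']: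
--                 comparison.append(value < desired_attributes[attribute])
--             else:
--                 comparison.append(value == desired_attributes[attribute])
--         if all(comparison):
--             return sue
-- ===== SOURCE B (Python) =====
-- desired_attributes = {
--     'children': 3,
--     'cats': 7,
--     'samoyeds': 2,
--     'pomeranians': 3,
--     'akitas': 0,
--     'vizslas': 0,
--     'goldfish': 5,
--     'trees': 3,
--     'cars': 2,
--     'perfumes': 1,
-- }
--
-- def part_two(puzzle_input):
--     # Outer loop over the ten constraints, filtering the candidate Sues;
--     # a Sue lacking an attribute passes that constraint trivially.
--     candidates = list(puzzle_input.items())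
--     for key, want in desired_attributes.items():
--         if key in ('cats', 'trees'):
--             keep = lambda v, w=want: v > w
--         elif key in ('pomeranians', 'goldfish'):
--             keep = lambda v, w=want: v < w
--         else:
--             keep = lambda v, w=want: v == w
--         candidates = [(sue, attrs) for sue, attrs in candidates
--                       if key not in attrs or keep(attrs[key])]
--     return candidates[0][0] if candidates else None
-- ===== Notes on version B (the rewrite author's own statement) =====
-- stated objective: alternative
-- what changed: B loops over the ten desired constraints and filters the candidate-Sue list down at each step (a Sue lacking the attribute passes trivially), then returns the first survivor, instead of A's per-Sue loop that builds a comparison list over that Sue's attributes.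
-- outside the precondition, e.g. on part_two({'a': {'children': 3}, 'b': {'zebras': 1}}): A returns 'a', B returns 'a'; on part_two({'a': {'zebras': 1}}): A raises KeyError, B returns 'a'
import Mathlib
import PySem

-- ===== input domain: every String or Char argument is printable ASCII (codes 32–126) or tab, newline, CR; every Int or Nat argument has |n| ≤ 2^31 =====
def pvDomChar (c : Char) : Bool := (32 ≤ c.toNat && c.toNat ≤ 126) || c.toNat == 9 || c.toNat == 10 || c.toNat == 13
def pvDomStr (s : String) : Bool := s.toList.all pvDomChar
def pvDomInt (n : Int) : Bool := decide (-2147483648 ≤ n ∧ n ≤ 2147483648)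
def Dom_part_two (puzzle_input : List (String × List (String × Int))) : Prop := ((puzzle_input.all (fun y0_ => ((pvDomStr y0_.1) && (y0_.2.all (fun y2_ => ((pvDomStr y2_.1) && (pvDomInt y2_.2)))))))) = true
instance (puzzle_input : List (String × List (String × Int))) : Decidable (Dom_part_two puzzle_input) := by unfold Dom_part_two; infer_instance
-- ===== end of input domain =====

-- One line: B filters the candidate list once per desired constraint and returns the first
-- survivor, instead of A's per-Sue scan; alternative decomposition, same cost.

-- ===== PORT A =====
def desired : List (String × Int) :=
  [("children", 3), ("cats", 7), ("samoyeds", 2), ("pomeranians", 3), ("akitas", 0),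
   ("vizslas", 0), ("goldfish", 5), ("trees", 3), ("cars", 2), ("perfumes", 1)]

-- desired_attributes[attribute]; exact whenever the key is present (guaranteed by Pre_)
def desiredGet (a : String) : Int :=
  ((desired.find? (fun p => p.1 == a)).map (·.2)).getD 0

def cmpA (a : String) (v : Int) : Bool :=
  if a == "cats" || a == "trees" then decide (v > desiredGet a)
  else if a == "pomeranians" || a == "goldfish" then decide (v < desiredGet a)
  else v == desiredGet a

def part_two (puzzle_input : List (String × List (String × Int))) : Option String :=
  match puzzle_input with
  | [] => none
  | (sue, attributes) :: rest =>
    let comparison := attributes.foldl (fun acc p => acc ++ [cmpA p.1 p.2]) []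
    if comparison.all id then some sue else part_two rest

-- ===== PORT B =====
def passB (kw : String × Int) (attrs : List (String × Int)) : Bool :=
  match attrs.find? (fun p => p.1 == kw.1) with
  | none => true
  | some p =>
    if kw.1 == "cats" || kw.1 == "trees" then decide (p.2 > kw.2)
    else if kw.1 == "pomeranians" || kw.1 == "goldfish" then decide (p.2 < kw.2)
    else p.2 == kw.2

def part_two_alt (puzzle_input : List (String × List (String × Int))) : Option String :=
  ((desired.foldl (fun cands kw => cands.filter (fun sa => passB kw sa.2)) puzzle_input).head?).map
    Prod.fst

-- ===== PRECONDITION & SPEC =====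
-- Pre_ excludes: (a) any Sue carrying an attribute outside the ten desired ones — on the first
-- such Sue it inspects A raises KeyError (an earlier match can still make A return); (b) inputs
-- whose Sue names or per-Sue attribute names repeat — both are dicts in A, so duplicates are not
-- faithfully representable as association lists (A sees only the collapsed dict).
def Pre_part_two (puzzle_input : List (String × List (String × Int))) : Prop :=
  (puzzle_input.map Prod.fst).Nodup ∧
  ∀ sa ∈ puzzle_input, (sa.2.map Prod.fst).Nodup ∧ ∀ p ∈ sa.2, p.1 ∈ desired.map Prod.fst
instance (puzzle_input : List (String × List (String × Int))) : Decidable (Pre_part_two puzzle_input) := by unfold Pre_part_two; infer_instance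

def pvWitness_part_two : (List (String × List (String × Int))) :=
  [("Sue 1", [("cats", 9), ("children", 3)]), ("Sue 2", [("goldfish", 5)])]

def Spec_part_two (puzzle_input : List (String × List (String × Int))) (out : Option String) : Prop := out = part_two_alt puzzle_input
instance (puzzle_input : List (String × List (String × Int))) (out : Option String) : Decidable (Spec_part_two puzzle_input out) := by unfold Spec_part_two; infer_instance

-- ===== CLAIM (what is proved, stated in full; the proofs are below) =====
def Claim_equal_part_two : Prop := ∀ (puzzle_input : List (String × List (String × Int))), Dom_part_two puzzle_input → Pre_part_two puzzle_input → Spec_part_two puzzle_input (part_two puzzle_input)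

-- ===== LEMMAS AND PROOFS =====

theorem foldl_append_all (attrs : List (String × Int)) (init : List Bool) :
    (attrs.foldl (fun acc p => acc ++ [cmpA p.1 p.2]) init).all id
      = (init.all id && attrs.all (fun p => cmpA p.1 p.2)) := by
  simp [Function.comp_def]

theorem foldl_filter_eq_filter_all {α β : Type} (ks : List α) (xs : List β) (P : α → β → Bool) :
    ks.foldl (fun c k => c.filter (P k)) xs = xs.filter (fun x => ks.all (fun k => P k x)) := by
  induction ks generalizing xs with
  | nil => simp
  | cons k ks ih =>
    rw [List.foldl_cons, ih, List.filter_filter]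
    exact List.filter_congr (fun x _ => by simp [Bool.and_comm])

theorem desiredGet_mem {k : String} {w : Int} (h : (k, w) ∈ desired) : desiredGet k = w := by
  simp only [desired, List.mem_cons, List.not_mem_nil, or_false] at h
  rcases h with h|h|h|h|h|h|h|h|h|h <;> (rw [Prod.mk.injEq] at h; rcases h with ⟨h1, h2⟩; subst h1; subst h2; decide)

theorem good_eq (attrs : List (String × Int)) (hnd : (attrs.map Prod.fst).Nodup)
    (hsub : ∀ p ∈ attrs, p.1 ∈ desired.map Prod.fst) :
    attrs.all (fun p => cmpA p.1 p.2) = desired.all (fun kw => passB kw attrs) := by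
  cases hA : attrs.all (fun p => cmpA p.1 p.2) with
  | false =>
    -- some attribute fails: find the witness and the corresponding desired key fails too
    rw [List.all_eq_false] at hA
    obtain ⟨p, hp, hcp⟩ := hA
    obtain ⟨q, hq, hqk⟩ := List.mem_map.mp (hsub p hp)
    symm
    rw [List.all_eq_false]
    refine ⟨q, hq, ?_⟩
    -- find? on attrs at key q.1 = p.1 yields p (nodup keys)
    have hfind : attrs.find? (fun r => r.1 == q.1) = some p := by
      cases hf : attrs.find? (fun r => r.1 == q.1) with
      | none =>
        exfalso
        have := List.find?_eq_none.mp hf p hp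
        simp [hqk] at this
      | some r =>
        have hr1 : r.1 = q.1 := by
          have := List.find?_some hf
          simpa using this
        have hrmem := List.mem_of_find?_eq_some hf
        have : r = p := List.inj_on_of_nodup_map hnd hrmem hp (by rw [hr1, hqk])
        rw [this]
    have hw : desiredGet q.1 = q.2 := desiredGet_mem (by simpa using hq)
    simp only [passB, hfind]
    simp only [cmpA] at hcp
    rw [← hqk, hw] at hcp
    exact hcp
  | true =>
    rw [List.all_eq_true] at hA
    symm
    rw [List.all_eq_true]
    intro kw hkw
    simp only [passB]
    cases hf : attrs.find? (fun r => r.1 == kw.1) with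
    | none => rfl
    | some p =>
      have hp1 : p.1 = kw.1 := by
        have := List.find?_some hf
        simpa using this
      have hpmem := List.mem_of_find?_eq_some hf
      have hc := hA p hpmem
      have hw : desiredGet kw.1 = kw.2 := desiredGet_mem (by simpa using hkw)
      simp only [cmpA, hp1, hw] at hc
      exact hc

theorem part_two_eq_filter (xs : List (String × List (String × Int)))
    (hpre : ∀ sa ∈ xs, (sa.2.map Prod.fst).Nodup ∧ ∀ p ∈ sa.2, p.1 ∈ desired.map Prod.fst) :
    part_two xs
      = ((xs.filter (fun sa => desired.all (fun kw => passB kw sa.2))).head?).map Prod.fst := by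
  induction xs with
  | nil => rfl
  | cons sa rest ih =>
    obtain ⟨hnd, hsub⟩ := hpre sa (List.mem_cons_self ..)
    have hgood := good_eq sa.2 hnd hsub
    obtain ⟨s, attrs⟩ := sa
    simp only [part_two, foldl_append_all, List.all_nil, Bool.true_and]
    simp only at hgood
    rw [hgood, List.filter_cons]
    cases hb : desired.all (fun kw => passB kw attrs) with
    | false => simpa [hb] using ih (fun sa h => hpre sa (List.mem_cons_of_mem _ h))
    | true => simp

-- ===== VERDICT (by name: the statement is the Claim_ definition above) =====
theorem part_two_spec : Claim_equal_part_two := by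
  intro xs _ hpre
  unfold Spec_part_two part_two_alt
  rw [foldl_filter_eq_filter_all]
  exact part_two_eq_filter xs hpre.2
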